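-- pv_equiv track=rewrite | github.com/Xianyang/codility | t6_lesson3_FrogJmp.py | solution
-- ===== SOURCE A (Python) =====
-- def solution(A):
--     # write your code in Python 2.7
--     A = sorted(A)
--
--     if len(A) == 0:
--         return 1
--
--     if A[0] != 1:
--         return 1
--
--     if A[-1] != len(A) + 1:
--         return len(A) + 1
--
--     for i in range(len(A) - 1):
--         if A[i + 1] - A[i] != 1:
--             return A[i] + 1
--
--     return 0
--     pass
-- ===== SOURCE B (Python) =====
-- def solution(A):
--     # O(n): min/max checks, then walk v = 1, 2, ... through a frequency map
--     # until a duplicate or a missing successor marks the break point.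
--     n = len(A)
--     if n == 0:
--         return 1
--     if min(A) != 1:
--         return 1
--     if max(A) != n + 1:
--         return n + 1
--     cnt = {}
--     for x in A:
--         cnt[x] = cnt.get(x, 0) + 1
--     v = 1
--     while cnt.get(v, 0) == 1 and (v + 1) in cnt:
--         v += 1
--     return v + 1
-- ===== Notes on version B (the rewrite author's own statement) =====
-- stated objective: faster
-- what changed: Replaces sort-then-adjacent-scan with an O(n) pass: min/max checks plus a frequency map walked upward from 1 until a duplicate value or a missing successor is found.
import Mathlib
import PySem

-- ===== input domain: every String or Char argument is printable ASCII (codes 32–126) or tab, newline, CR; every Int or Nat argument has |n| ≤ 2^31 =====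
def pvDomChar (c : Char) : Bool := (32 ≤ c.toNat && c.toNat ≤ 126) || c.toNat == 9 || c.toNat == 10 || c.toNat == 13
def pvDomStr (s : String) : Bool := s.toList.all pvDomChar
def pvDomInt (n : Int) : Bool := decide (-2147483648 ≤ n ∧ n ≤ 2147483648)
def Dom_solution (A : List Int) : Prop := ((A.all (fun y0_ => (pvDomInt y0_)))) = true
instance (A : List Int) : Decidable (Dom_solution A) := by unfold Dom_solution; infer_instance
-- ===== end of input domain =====

-- B replaces A's sort + adjacent-difference scan by min/max checks plus a frequency-map
-- walk from 1 up to the first duplicate or missing successor (objective: faster).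


-- ===== PORT A =====
-- 'for i in range(len(A)-1): if A[i+1]-A[i] != 1: return A[i]+1' then 'return 0';
-- all indices visited are in range, so List.getD is exact here.
def solLoopA (s : List Int) : List Nat → Int
  | [] => 0
  | i :: rest =>
    if s.getD (i + 1) 0 - s.getD i 0 ≠ 1 then s.getD i 0 + 1
    else solLoopA s rest

def solution (A : List Int) : Int :=
  let s := PySem.List.sorted A (fun x => x) false
  if s.length = 0 then 1
  else if s.getD 0 0 ≠ 1 then 1                    -- A[0] != 1 (nonempty, so index 0 in range)
  else if s.getD (s.length - 1) 0 ≠ (s.length : Int) + 1 then (s.length : Int) + 1  -- A[-1] != len(A)+1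
  else solLoopA s (List.range (s.length - 1))

-- ===== PORT B =====
-- 'while cnt.get(v, 0) == 1 and (v + 1) in cnt: v += 1'; the fuel argument only makes the
-- loop total (n+1 steps are never exhausted once the min/max checks passed), and on
-- exhaustion it returns v + 1, the same shape as the loop exit.
def altLoop (cnt : PySem.Dict Int Int) (v : Int) : Nat → Int
  | 0 => v + 1
  | fuel + 1 =>
    if cnt.getD v 0 == 1 && cnt.contains (v + 1) then altLoop cnt (v + 1) fuel
    else v + 1

def solution_alt (A : List Int) : Int :=
  let n := A.length
  if n = 0 then 1
  else if (PySem.List.min? A (fun x => x)).getD 0 ≠ 1 then 1            -- min(A) != 1 (nonempty: min? = some)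
  else if (PySem.List.max? A (fun x => x)).getD 0 ≠ (n : Int) + 1 then (n : Int) + 1
  else
    let cnt := A.foldl (fun d x => d.insert x (d.getD x 0 + 1)) PySem.Dict.empty
    altLoop cnt 1 (n + 1)

-- ===== PRECONDITION & SPEC =====
def Spec_solution (A : List Int) (out : Int) : Prop := out = solution_alt A
instance (A : List Int) (out : Int) : Decidable (Spec_solution A out) := by unfold Spec_solution; infer_instance

-- ===== CLAIM (what is proved, stated in full; the proofs are below) =====
def Claim_equal_solution : Prop := ∀ (A : List Int), Dom_solution A → Spec_solution A (solution A)

-- ===== LEMMAS AND PROOFS =====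

-- a value sitting alone at index i of a list occurs exactly once
lemma count_one_at (s : List Int) (v : Int) (i : Nat) (hi : i < s.length) (hv : s[i] = v)
    (h : ∀ k (_ : k < s.length), k ≠ i → s[k] ≠ v) : s.count v = 1 := by
  have h1 : (s.take i).count v = 0 := by
    refine List.count_eq_zero.mpr fun hmem => ?_
    obtain ⟨k, hk, he⟩ := List.mem_iff_getElem.mp hmem
    have hk' : k < i ∧ k < s.length := by simpa [Nat.lt_min] using hk
    exact h k hk'.2 (by omega) (by simpa using he)
  have h2 : (s.drop (i + 1)).count v = 0 := by
    refine List.count_eq_zero.mpr fun hmem => ?_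
    obtain ⟨k, hk, he⟩ := List.mem_iff_getElem.mp hmem
    have hk' : i + 1 + k < s.length := by simp at hk; omega
    exact h (i + 1 + k) hk' (by omega) (by simpa using he)
  have hd : s[i] :: s.drop (i + 1) = s.drop i := List.getElem_cons_drop hi
  conv_lhs => rw [← List.take_append_drop i s]
  rw [List.count_append, ← hd, List.count_cons, h1, h2, hv]
  simp

-- two adjacent equal entries give count ≥ 2
lemma two_le_count (s : List Int) (v : Int) (i : Nat) (h1 : i + 1 < s.length)
    (ha : s[i] = v) (hb : s[i + 1] = v) : 2 ≤ s.count v := by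
  have hd : s.drop i = s[i]'(by omega) :: s[i + 1] :: s.drop (i + 2) := by
    rw [List.getElem_cons_drop h1, List.getElem_cons_drop (by omega)]
  have hle := (List.drop_sublist i s).count_le v
  rw [hd, List.count_cons, List.count_cons, ha, hb] at hle
  simp at hle
  omega

-- the core equivalence: A's adjacent-gap scan over the sorted list equals B's
-- frequency-map walk, given the invariant s[j] = j+1 for j ≤ i
lemma loop_eq (s : List Int) (cnt : PySem.Dict Int Int)
    (hc : ∀ v : Int, cnt.getD v 0 = (s.count v : Int))
    (hm : ∀ v : Int, cnt.contains v = true ↔ v ∈ s)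
    (hpair : s.Pairwise (fun a b => a ≤ b))
    (hlast : ∀ (h : 0 < s.length), s[s.length - 1] = (s.length : Int) + 1) :
    ∀ fuel i, i < s.length → (∀ j (_ : j < s.length), j ≤ i → s[j] = (j : Int) + 1) →
      s.length - 1 - i ≤ fuel →
      solLoopA s (List.range' i (s.length - 1 - i)) = altLoop cnt ((i : Int) + 1) fuel := by
  have hne : ∀ i, i < s.length → (∀ j (_ : j < s.length), j ≤ i → s[j] = (j : Int) + 1) →
      i < s.length - 1 := by
    intro i hi hinv
    by_contra hge
    have hieq : i = s.length - 1 := by omega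
    have h1 : s.getD i 0 = (i : Int) + 1 := by
      rw [List.getD_eq_getElem s 0 hi]; exact hinv i hi le_rfl
    have h2 : s.getD (s.length - 1) 0 = (s.length : Int) + 1 := by
      rw [List.getD_eq_getElem s 0 (by omega)]; exact hlast (by omega)
    rw [hieq] at h1
    rw [h1] at h2
    omega
  intro fuel
  induction fuel with
  | zero =>
    intro i hi hinv hfuel
    exact absurd (hne i hi hinv) (by omega)
  | succ fuel ih =>
    intro i hi hinv hfuel
    have hlt := hne i hi hinv
    have hi1 : i + 1 < s.length := by omega
    have hsi : s.getD i 0 = (i : Int) + 1 := by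
      rw [List.getD_eq_getElem s 0 hi]; exact hinv i hi le_rfl
    have hsi1 : s.getD (i + 1) 0 = s[i + 1] := List.getD_eq_getElem s 0 hi1
    have hgetmono := List.pairwise_iff_getElem.mp hpair
    have hrem : s.length - 1 - i = (s.length - 1 - (i + 1)) + 1 := by omega
    rw [hrem, List.range'_succ]
    simp only [solLoopA]
    by_cases hb : s[i + 1] = (i : Int) + 2
    · -- gap of exactly 1: both loops continue
      have hcond : ¬ (s.getD (i + 1) 0 - s.getD i 0 ≠ 1) := by
        rw [hsi, hsi1, hb]; omega
      rw [if_neg hcond]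
      have hinv' : ∀ j (_ : j < s.length), j ≤ i + 1 → s[j] = (j : Int) + 1 := by
        intro j hj hji
        rcases Nat.lt_or_ge j (i + 1) with h | h
        · exact hinv j hj (by omega)
        · have : j = i + 1 := by omega
          subst this; rw [hb]; push_cast; ring
      have hcount : s.count ((i : Int) + 1) = 1 := by
        refine count_one_at s _ i hi (hinv i hi le_rfl) ?_
        intro k hk hki hkv
        rcases Nat.lt_or_ge k i with h | h
        · have := hinv k hk (by omega)
          rw [this] at hkv; omega
        · have hk1 : i + 1 ≤ k := by omega
          have hle : s[i + 1] ≤ s[k] := by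
            rcases Nat.eq_or_lt_of_le hk1 with h' | h'
            · subst h'; exact le_rfl
            · exact hgetmono (i + 1) k hi1 hk h'
          rw [hb, hkv] at hle; omega
      have hmem : ((i : Int) + 2) ∈ s := hb ▸ List.getElem_mem hi1
      rw [altLoop]
      have hcondB : (cnt.getD ((i:Int)+1) 0 == 1 && cnt.contains ((i:Int)+1+1)) = true := by
        rw [Bool.and_eq_true]
        constructor
        · rw [hc, hcount]; rfl
        · rw [show (i:Int)+1+1 = (i:Int)+2 by ring]; exact (hm _).mpr hmem
      rw [if_pos hcondB]
      rw [show (i:Int)+1+1 = ((i + 1 : Nat) : Int) + 1 by push_cast; ring]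
      exact ih (i + 1) hi1 hinv' (by omega)  -- recursive call on the tail range
    · -- break point: A returns s[i]+1, B's loop stops at v = i+1
      have hcond : s.getD (i + 1) 0 - s.getD i 0 ≠ 1 := by
        rw [hsi, hsi1]; intro h; apply hb; omega
      rw [if_pos hcond, hsi]
      have hgeb : (i : Int) + 1 ≤ s[i + 1] := by
        have := hgetmono i (i + 1) hi hi1 (by omega)
        rw [hinv i hi le_rfl] at this; exact this
      have hcondB : (cnt.getD ((i:Int)+1) 0 == 1 && cnt.contains ((i:Int)+1+1)) = false := by
        rcases eq_or_ne (s[i + 1]) ((i : Int) + 1) with hdup | hgap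
        · -- duplicate value i+1
          have h2 := two_le_count s ((i : Int) + 1) i hi1 (hinv i hi le_rfl) hdup
          rw [Bool.and_eq_false_iff]; left
          rw [hc]
          simp only [beq_eq_false_iff_ne, ne_eq]
          intro h
          have : s.count ((i:Int)+1) = 1 := by exact_mod_cast h
          omega
        · -- real gap: i+2 is absent
          have hnot : ((i : Int) + 2) ∉ s := by
            intro hmem
            obtain ⟨k, hk, he⟩ := List.mem_iff_getElem.mp hmem
            rcases Nat.lt_or_ge k (i + 1) with h | h
            · have := hinv k hk (by omega)
              rw [this] at he; omega
            · have : s[i + 1] ≤ s[k] := by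
                rcases Nat.eq_or_lt_of_le h with h' | h'
                · simp [h']
                · exact hgetmono (i+1) k hi1 hk h'
              rw [he] at this
              have : s[i + 1] = (i:Int) + 2 ∨ s[i+1] < (i:Int)+2 ∨ (i:Int)+2 < s[i+1] := by omega
              rcases this with h' | h' | h'
              · exact hb h'
              · omega
              · omega
          rw [Bool.and_eq_false_iff]; right
          rw [show (i:Int)+1+1 = (i:Int)+2 by ring]
          exact (Bool.not_eq_true _).mp fun h => hnot ((hm _).mp h)
      rw [altLoop, if_neg (by simp [hcondB])]

-- min(A) is the head of sorted(A) (as a value); default 0 never fires on nonempty A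
lemma min_getD (A : List Int) (h : A ≠ []) :
    (PySem.List.min? A (fun x => x)).getD 0 =
      (PySem.List.sorted A (fun x => x) false).getD 0 0 := by
  set s := PySem.List.sorted A (fun x => x) false with hs
  have hperm : s.Perm A := PySem.List.sorted_perm A _ false
  have hslen : 0 < s.length := by
    rw [PySem.List.length_sorted]; exact List.length_pos_of_ne_nil h
  obtain ⟨m, hm⟩ : ∃ m, PySem.List.min? A (fun x => x) = some m := by
    cases hmin : PySem.List.min? A (fun x => x) with
    | none => exact absurd ((PySem.List.min?_eq_none_iff A _).mp hmin) h
    | some m => exact ⟨m, rfl⟩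
  rw [hm, List.getD_eq_getElem s 0 hslen]
  have h1 : m ≤ s[0] := PySem.List.min?_isMin hm _ (hperm.mem_iff.mp (List.getElem_mem hslen))
  have h2 : s[0] ≤ m := by
    have hmem : m ∈ s := hperm.mem_iff.mpr (PySem.List.min?_mem hm)
    obtain ⟨k, hk, he⟩ := List.mem_iff_getElem.mp hmem
    rcases Nat.eq_zero_or_pos k with h' | h'
    · subst h'; exact le_of_eq he
    · have := List.pairwise_iff_getElem.mp (PySem.List.sorted_pairwise A (fun x => x)) 0 k hslen hk h'
      rw [he] at this; exact this
  exact le_antisymm h1 h2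

-- max(A) is the last element of sorted(A) (as a value)
lemma max_getD (A : List Int) (h : A ≠ []) :
    (PySem.List.max? A (fun x => x)).getD 0 =
      (PySem.List.sorted A (fun x => x) false).getD
        ((PySem.List.sorted A (fun x => x) false).length - 1) 0 := by
  set s := PySem.List.sorted A (fun x => x) false with hs
  have hperm : s.Perm A := PySem.List.sorted_perm A _ false
  have hslen : 0 < s.length := by
    rw [PySem.List.length_sorted]; exact List.length_pos_of_ne_nil h
  have hlast : s.length - 1 < s.length := by omega
  obtain ⟨m, hm⟩ : ∃ m, PySem.List.max? A (fun x => x) = some m := by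
    cases hmax : PySem.List.max? A (fun x => x) with
    | none => exact absurd ((PySem.List.max?_eq_none_iff A _).mp hmax) h
    | some m => exact ⟨m, rfl⟩
  rw [hm, List.getD_eq_getElem s 0 hlast]
  have h1 : s[s.length - 1] ≤ m :=
    PySem.List.max?_isMax hm _ (hperm.mem_iff.mp (List.getElem_mem hlast))
  have h2 : m ≤ s[s.length - 1] := by
    have hmem : m ∈ s := hperm.mem_iff.mpr (PySem.List.max?_mem hm)
    obtain ⟨k, hk, he⟩ := List.mem_iff_getElem.mp hmem
    rcases Nat.lt_or_ge k (s.length - 1) with h' | h'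
    · have := List.pairwise_iff_getElem.mp (PySem.List.sorted_pairwise A (fun x => x)) k _ hk hlast h'
      rw [he] at this; exact this
    · have : k = s.length - 1 := by omega
      subst this; exact le_of_eq he.symm
  exact le_antisymm h2 h1

-- ===== VERDICT (by name: the statement is the Claim_ definition above) =====
theorem solution_spec : Claim_equal_solution := by
  intro A _
  unfold Spec_solution solution solution_alt
  dsimp only
  set s := PySem.List.sorted A (fun x => x) false with hs
  have hperm : s.Perm A := PySem.List.sorted_perm A _ false
  have hlen : s.length = A.length := PySem.List.length_sorted A _ false
  by_cases h0 : A.length = 0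
  · simp [h0, hlen]
  · have hA : A ≠ [] := fun h => h0 (by rw [h]; rfl)
    have hslen : 0 < s.length := by omega
    rw [if_neg (by omega : ¬ s.length = 0), if_neg h0]
    rw [min_getD A hA, max_getD A hA, ← hs, ← hlen]
    by_cases hmin : s.getD 0 0 ≠ 1
    · rw [if_pos hmin, if_pos hmin]
    · rw [if_neg hmin, if_neg hmin]
      by_cases hmax : s.getD (s.length - 1) 0 ≠ (s.length : Int) + 1
      · rw [if_pos hmax, if_pos hmax]
      · rw [if_neg hmax, if_neg hmax]
        push Not at hmin hmax
        rw [PySem.Dict.foldl_insert_getD_add_one_eq_counter A]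
        have hc : ∀ v : Int, (PySem.Dict.counter A).getD v 0 = (s.count v : Int) := by
          intro v
          rw [PySem.Dict.getD_counter A v, hperm.count_eq]
        have hmm : ∀ v : Int, (PySem.Dict.counter A).contains v = true ↔ v ∈ s := by
          intro v
          rw [PySem.Dict.contains_counter A v]
          simp [hperm.mem_iff]
        have hlast : ∀ (_ : 0 < s.length), s[s.length - 1] = (s.length : Int) + 1 := by
          intro h
          rw [← List.getD_eq_getElem s 0 (by omega)]
          exact hmax
        have hinv0 : ∀ j (_ : j < s.length), j ≤ 0 → s[j] = (j : Int) + 1 := by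
          intro j hj hj0
          have : j = 0 := by omega
          subst this
          rw [← List.getD_eq_getElem s 0 hj, hmin]
          norm_num
        have := loop_eq s (PySem.Dict.counter A) hc hmm
          (PySem.List.sorted_pairwise A (fun x => x)) hlast (s.length + 1) 0 hslen hinv0 (by omega)
        rw [List.range_eq_range']
        rw [show s.length - 1 = s.length - 1 - 0 from rfl, this]
        norm_num
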